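-- pv_equiv track=rewrite | github.com/tbowen8615/CodePath | Unit4_Session2_Standard.py | identify_popular_creators
-- ===== SOURCE A (Python) =====
-- def identify_popular_creators(nft_collection):
--
--     result_list = []
--     new_set = set()
--
--     for nft in nft_collection:
--         if nft["creator"] in new_set:
--             result_list.append(nft["creator"])
--
--         else:
--             new_set.add(nft["creator"])
--
--     return result_list
-- ===== SOURCE B (Python) =====
-- def identify_popular_creators(nft_collection):
--     first_index = {}
--     for i, nft in enumerate(nft_collection):
--         first_index.setdefault(nft["creator"], i)
--     return [nft["creator"] for i, nft in enumerate(nft_collection)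
--             if first_index[nft["creator"]] < i]
-- ===== Notes on version B (the rewrite author's own statement) =====
-- stated objective: alternative
-- what changed: Replaces the incremental seen-set strategy with a first-occurrence index table built in one pass plus an enumerate-filter pass keeping creators whose index exceeds their first occurrence.
import Mathlib
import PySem

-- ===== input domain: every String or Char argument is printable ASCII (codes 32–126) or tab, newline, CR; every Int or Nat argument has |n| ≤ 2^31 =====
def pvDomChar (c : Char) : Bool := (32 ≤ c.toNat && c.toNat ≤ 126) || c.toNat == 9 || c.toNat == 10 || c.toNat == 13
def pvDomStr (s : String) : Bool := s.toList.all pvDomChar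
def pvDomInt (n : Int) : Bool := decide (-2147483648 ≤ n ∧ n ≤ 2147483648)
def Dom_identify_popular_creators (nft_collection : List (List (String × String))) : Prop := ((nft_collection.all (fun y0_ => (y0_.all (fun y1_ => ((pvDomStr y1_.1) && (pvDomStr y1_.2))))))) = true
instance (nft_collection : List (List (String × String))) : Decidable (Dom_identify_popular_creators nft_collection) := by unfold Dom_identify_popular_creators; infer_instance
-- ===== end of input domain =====

-- B replaces A's incremental seen-set with a first-occurrence index table plus an
-- enumerate-filter pass (alternative decomposition; same return value on Pre_).

-- ===== PORT A =====
-- nft["creator"]: first-match lookup; Pre_ guarantees the key exists, so getD never fires.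
def pvKey (nft : List (String × String)) : String :=
  (PySem.Dict.get? (PySem.Dict.mk nft) "creator").getD ""

def identify_popular_creators (nft_collection : List (List (String × String))) : List String :=
  (nft_collection.foldl
    (fun (st : List String × PySem.Set String) nft =>
      let c := pvKey nft
      if PySem.Set.contains st.2 c then (st.1 ++ [c], st.2)
      else (st.1, PySem.Set.add st.2 c))
    ([], PySem.Set.empty)).1

-- ===== PORT B =====
def identify_popular_creators_alt (nft_collection : List (List (String × String))) : List String :=
  let fi : PySem.Dict String Int :=
    (PySem.List.enumerate nft_collection).foldl
      (fun d p => PySem.Dict.setdefault d (pvKey p.2) p.1) PySem.Dict.empty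
  (PySem.List.enumerate nft_collection).filterMap
    (fun p => if (PySem.Dict.get? fi (pvKey p.2)).getD p.1 < p.1 then some (pvKey p.2) else none)

-- ===== PRECONDITION & SPEC =====
-- Pre_ excludes exactly the inputs where some nft lacks the key "creator": both A and B raise KeyError there.
def Pre_identify_popular_creators (nft_collection : List (List (String × String))) : Prop :=
  ∀ nft ∈ nft_collection, "creator" ∈ nft.map Prod.fst

instance (nft_collection : List (List (String × String))) : Decidable (Pre_identify_popular_creators nft_collection) := by unfold Pre_identify_popular_creators; infer_instance

def pvWitness_identify_popular_creators : (List (List (String × String))) :=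
  [[("creator", "alice")], [("creator", "bob")], [("creator", "alice")]]

def Spec_identify_popular_creators (nft_collection : List (List (String × String))) (out : List String) : Prop := out = identify_popular_creators_alt nft_collection
instance (nft_collection : List (List (String × String))) (out : List String) : Decidable (Spec_identify_popular_creators nft_collection out) := by unfold Spec_identify_popular_creators; infer_instance

-- ===== CLAIM (what is proved, stated in full; the proofs are below) =====
def Claim_equal_identify_popular_creators : Prop := ∀ (nft_collection : List (List (String × String))), Dom_identify_popular_creators nft_collection → Pre_identify_popular_creators nft_collection → Spec_identify_popular_creators nft_collection (identify_popular_creators nft_collection)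

-- ===== LEMMAS AND PROOFS =====

-- A's loop, with the set as the only state (accumulator factored out).
def goA (s : PySem.Set String) : List (List (String × String)) → List String
  | [] => []
  | nft :: t =>
    let c := pvKey nft
    if c ∈ s then c :: goA s t else goA (PySem.Set.add s c) t

lemma foldA_eq (xs : List (List (String × String))) :
    ∀ (res : List String) (s : PySem.Set String),
    (xs.foldl
      (fun (st : List String × PySem.Set String) nft =>
        let c := pvKey nft
        if PySem.Set.contains st.2 c then (st.1 ++ [c], st.2)
        else (st.1, PySem.Set.add st.2 c))
      (res, s)).1 = res ++ goA s xs := by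
  induction xs with
  | nil => intro res s; simp [goA]
  | cons nft t ih =>
    intro res s
    simp only [List.foldl, goA]
    by_cases h : pvKey nft ∈ s
    · have hb : PySem.Set.contains s (pvKey nft) = true := by
        simpa [PySem.Set.contains] using h
      rw [if_pos h, hb]
      simp only [if_true, ih]
      simp
    · have hb : PySem.Set.contains s (pvKey nft) = false := by
        simpa [PySem.Set.contains] using h
      rw [if_neg h, hb]
      simp only [Bool.false_eq_true, if_false, ih]

-- idxOf? unfolded on a cons (String instance of the findIdx? step).
lemma idxOf?_cons_str (a c : String) (l : List String) :
    List.idxOf? c (a :: l) = if a = c then some 0 else (List.idxOf? c l).map (· + 1) := by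
  simp [List.idxOf?, List.findIdx?_cons]

-- First-index dict lookup = first index in the key list (offset by the enumerate start).
lemma get?_buildFi (xs : List (List (String × String))) :
    ∀ (i0 : Int) (d : PySem.Dict String Int) (c : String),
    PySem.Dict.get?
      ((PySem.List.enumerate xs i0).foldl
        (fun d p => PySem.Dict.setdefault d (pvKey p.2) p.1) d) c
    = ((PySem.Dict.get? d c).orElse
        (fun _ => (List.idxOf? c (xs.map pvKey)).map (fun j => i0 + (j : Int)))) := by
  induction xs with
  | nil =>
    intro i0 d c
    cases hd : PySem.Dict.get? d c <;>
      simp [PySem.List.enumerate_nil, Option.orElse, hd]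
  | cons nft t ih =>
    intro i0 d c
    rw [PySem.List.enumerate_cons]
    simp only [List.foldl, List.map]
    rw [ih, idxOf?_cons_str]
    by_cases hk : pvKey nft = c
    · subst hk
      rw [PySem.Dict.get?_setdefault_self]
      cases hd : PySem.Dict.get? d (pvKey nft) <;> simp [Option.orElse, hd]
    · rw [PySem.Dict.get?_setdefault_of_ne _ _ (fun e => hk e.symm)]
      cases hd : PySem.Dict.get? d c
      · simp only [hd, Option.orElse, if_neg hk]
        cases h2 : List.idxOf? c (t.map pvKey) <;> simp [h2] <;> push_cast <;> ring
      · simp [Option.orElse, hd]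

-- idxOf? on an append, for a key already in the prefix: index stays below the prefix length.
lemma idxOf?_append_of_mem_lt {c : String} {pre rest : List String} (h : c ∈ pre) :
    ∃ j, List.idxOf? c (pre ++ rest) = some j ∧ j < pre.length := by
  induction pre with
  | nil => cases h
  | cons a t ih =>
    by_cases ha : a = c
    · exact ⟨0, by simp [idxOf?_cons_str, ha], by simp⟩
    · have hc : c ∈ t := by
        cases h with
        | head => exact absurd rfl ha
        | tail _ h => exact h
      obtain ⟨j, hj, hlt⟩ := ih hc
      refine ⟨j + 1, ?_, by simpa using Nat.succ_lt_succ hlt⟩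
      rw [List.cons_append, idxOf?_cons_str, if_neg ha, hj]
      rfl

-- idxOf? on an append whose suffix starts with the (fresh) key.
lemma idxOf?_append_fresh {c : String} {pre rest : List String} (h : c ∉ pre) :
    List.idxOf? c (pre ++ c :: rest) = some pre.length := by
  induction pre with
  | nil => simp [idxOf?_cons_str]
  | cons a t ih =>
    have ha : a ≠ c := fun e => h (e ▸ List.mem_cons_self)
    have ht : c ∉ t := fun hc => h (List.mem_cons_of_mem _ hc)
    rw [List.cons_append, idxOf?_cons_str, if_neg ha, ih ht]
    rfl

-- Main bridge: A's seen-set loop equals B's index-table filter, generalized over the processed prefix.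
lemma main_bridge (F : String → Option Int) :
    ∀ (xs : List (List (String × String))) (pre : List String) (s : PySem.Set String),
    (∀ c, c ∈ s ↔ c ∈ pre) →
    (∀ c, F c = (List.idxOf? c (pre ++ xs.map pvKey)).map (fun j => (j : Int))) →
    goA s xs =
      (PySem.List.enumerate xs (pre.length : Int)).filterMap
        (fun p => if (F (pvKey p.2)).getD p.1 < p.1 then some (pvKey p.2) else none) := by
  intro xs
  induction xs with
  | nil => intro pre s _ _; simp [goA, PySem.List.enumerate_nil]
  | cons nft t ih =>
    intro pre s hs hF
    rw [PySem.List.enumerate_cons, List.filterMap_cons]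
    have hkeys : pre ++ (nft :: t).map pvKey = (pre ++ [pvKey nft]) ++ t.map pvKey := by simp
    have hlen : (((pre ++ [pvKey nft]).length : Nat) : Int) = (pre.length : Int) + 1 := by
      simp
    have hF' : ∀ c, F c =
        (List.idxOf? c ((pre ++ [pvKey nft]) ++ t.map pvKey)).map (fun j => (j : Int)) := by
      intro c; rw [hF, hkeys]
    simp only [goA]
    by_cases h : pvKey nft ∈ s
    · have hmem : pvKey nft ∈ pre := (hs _).mp h
      obtain ⟨j, hj, hlt⟩ :=
        idxOf?_append_of_mem_lt (rest := (nft :: t).map pvKey) hmem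
      have hcond : (F (pvKey nft)).getD (pre.length : Int) < (pre.length : Int) := by
        rw [hF (pvKey nft), hj]
        simpa using (by exact_mod_cast hlt : (j : Int) < (pre.length : Int))
      have hs' : ∀ c, c ∈ s ↔ c ∈ pre ++ [pvKey nft] := by
        intro c
        rw [hs]
        constructor
        · exact fun hc => List.mem_append_left _ hc
        · intro hc
          rcases List.mem_append.mp hc with hc | hc
          · exact hc
          · exact (List.mem_singleton.mp hc) ▸ hmem
      have hrec := ih (pre ++ [pvKey nft]) s hs' hF'
      rw [if_pos h, if_pos hcond]
      rw [hlen] at hrec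
      rw [← hrec]
    · have hmem : pvKey nft ∉ pre := fun hc => h ((hs _).mpr hc)
      have hj : List.idxOf? (pvKey nft) (pre ++ (nft :: t).map pvKey)
          = some pre.length := by
        simpa using idxOf?_append_fresh (rest := t.map pvKey) hmem
      have hcond : ¬ ((F (pvKey nft)).getD (pre.length : Int) < (pre.length : Int)) := by
        rw [hF (pvKey nft), hj]; simp
      have hs' : ∀ c, c ∈ PySem.Set.add s (pvKey nft) ↔ c ∈ pre ++ [pvKey nft] := by
        intro c
        rw [PySem.Set.mem_add, List.mem_append, hs, List.mem_singleton]
      have hrec := ih (pre ++ [pvKey nft]) (PySem.Set.add s (pvKey nft)) hs' hF'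
      rw [if_neg h, if_neg hcond]
      rw [hlen] at hrec
      rw [← hrec]

-- ===== VERDICT (by name: the statement is the Claim_ definition above) =====
theorem identify_popular_creators_spec : Claim_equal_identify_popular_creators := by
  intro xs _ _
  unfold Spec_identify_popular_creators identify_popular_creators identify_popular_creators_alt
  rw [foldA_eq, List.nil_append]
  have hF : ∀ c,
      PySem.Dict.get?
        ((PySem.List.enumerate xs).foldl
          (fun d p => PySem.Dict.setdefault d (pvKey p.2) p.1) PySem.Dict.empty) c
      = (List.idxOf? c ([] ++ xs.map pvKey)).map (fun j => (j : Int)) := by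
    intro c
    rw [get?_buildFi]
    simp [Option.orElse, PySem.Dict.empty, PySem.Dict.get?]
  have hmain := main_bridge _ xs [] PySem.Set.empty
    (by intro c; simp [PySem.Set.empty]) hF
  simpa using hmain
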